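-- pv_equiv track=rewrite | github.com/yuxin101/skills | skills/wjn161/mcd-order-skill/scripts/order_helper.py | _find_meal_by_name
-- ===== SOURCE A (Python) =====
-- def _find_meal_by_name(name: str, meals_map: dict) -> dict | None:
--     """在菜单中按名称查找菜品：先精确匹配，再模糊匹配（互相包含）"""
--     # 精确匹配
--     for code, info in meals_map.items():
--         if info.get("name", "") == name:
--             return {"code": code, **info}
--     # 模糊匹配
--     for code, info in meals_map.items():
--         meal_name = info.get("name", "")
--         if name in meal_name or meal_name in name:
--             return {"code": code, **info}
--     return None
-- ===== SOURCE B (Python) =====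
-- def _find_meal_by_name(name: str, meals_map: dict) -> dict | None:
--     """Single pass: return at an exact name match immediately; remember only the
--     first fuzzy (mutual-containment) match and use it after the loop."""
--     candidate = None
--     for code, info in meals_map.items():
--         meal_name = info.get("name", "")
--         if meal_name == name:
--             return {"code": code, **info}
--         if candidate is None and (name in meal_name or meal_name in name):
--             candidate = (code, info)
--     if candidate is not None:
--         code, info = candidate
--         return {"code": code, **info}
--     return None
-- ===== Notes on version B (the rewrite author's own statement) =====
-- stated objective: alternative
-- what changed: Replaced A's two sequential scans (exact pass, then fuzzy pass) by one scan that returns on an exact match and remembers only the first fuzzy candidate for use after the loop.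
import Mathlib
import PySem

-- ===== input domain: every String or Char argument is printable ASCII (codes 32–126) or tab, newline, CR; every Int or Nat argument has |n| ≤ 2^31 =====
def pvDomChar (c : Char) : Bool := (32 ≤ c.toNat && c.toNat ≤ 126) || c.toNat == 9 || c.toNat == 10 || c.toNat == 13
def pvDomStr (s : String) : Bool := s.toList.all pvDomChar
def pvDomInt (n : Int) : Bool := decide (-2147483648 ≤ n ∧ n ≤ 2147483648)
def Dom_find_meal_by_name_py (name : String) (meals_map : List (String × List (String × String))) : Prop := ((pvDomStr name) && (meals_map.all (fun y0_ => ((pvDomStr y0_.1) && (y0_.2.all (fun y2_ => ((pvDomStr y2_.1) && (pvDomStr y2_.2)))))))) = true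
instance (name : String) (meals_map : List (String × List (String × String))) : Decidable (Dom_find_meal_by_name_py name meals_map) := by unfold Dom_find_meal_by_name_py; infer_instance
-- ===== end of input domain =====

-- B replaces A's two sequential scans by one scan that keeps the first fuzzy candidate; return values only.

-- ===== PORT A =====
-- info.get("name", "") on the Python dict `info`
def pvGetName (info : List (String × String)) : String :=
  (PySem.Dict.ofList info).getD "name" ""

-- {"code": code, **info} : dict literal, "code" inserted first, then info's items (overwrite keeps position)
def pvMkResult (code : String) (info : List (String × String)) : List (String × String) :=
  (PySem.Dict.ofList (("code", code) :: info)).items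

-- first loop of A: exact match
def pvFindExact (name : String) : List (String × List (String × String)) → Option (List (String × String))
  | [] => none
  | (code, info) :: rest =>
      if pvGetName info == name then some (pvMkResult code info)
      else pvFindExact name rest

-- second loop of A: fuzzy match (mutual containment)
def pvFindFuzzy (name : String) : List (String × List (String × String)) → Option (List (String × String))
  | [] => none
  | (code, info) :: rest =>
      let meal_name := pvGetName info
      if PySem.Str.isIn name meal_name || PySem.Str.isIn meal_name name then
        some (pvMkResult code info)
      else pvFindFuzzy name rest

def find_meal_by_name_py (name : String) (meals_map : List (String × List (String × String))) : Option (List (String × String)) :=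
  let items := (PySem.Dict.ofList meals_map).items
  match pvFindExact name items with
  | some r => some r
  | none => pvFindFuzzy name items

-- ===== PORT B =====
-- single pass with the first fuzzy candidate carried along
def pvFindLoop (name : String) : List (String × List (String × String)) → Option (String × List (String × String)) → Option (List (String × String))
  | [], cand =>
      match cand with
      | some (code, info) => some (pvMkResult code info)
      | none => none
  | (code, info) :: rest, cand =>
      let meal_name := pvGetName info
      if meal_name == name then some (pvMkResult code info)
      else
        pvFindLoop name rest
          (if cand.isNone && (PySem.Str.isIn name meal_name || PySem.Str.isIn meal_name name)
           then some (code, info) else cand)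

def find_meal_by_name_py_alt (name : String) (meals_map : List (String × List (String × String))) : Option (List (String × String)) :=
  pvFindLoop name (PySem.Dict.ofList meals_map).items none

-- ===== PRECONDITION & SPEC =====
def Spec_find_meal_by_name_py (name : String) (meals_map : List (String × List (String × String))) (out : Option (List (String × String))) : Prop := out = find_meal_by_name_py_alt name meals_map
instance (name : String) (meals_map : List (String × List (String × String))) (out : Option (List (String × String))) : Decidable (Spec_find_meal_by_name_py name meals_map out) := by unfold Spec_find_meal_by_name_py; infer_instance

-- ===== CLAIM (what is proved, stated in full; the proofs are below) =====
def Claim_equal_find_meal_by_name_py : Prop := ∀ (name : String) (meals_map : List (String × List (String × String))), Dom_find_meal_by_name_py name meals_map → Spec_find_meal_by_name_py name meals_map (find_meal_by_name_py name meals_map)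

-- ===== LEMMAS AND PROOFS =====
-- loop invariant: the single pass equals "exact result, else saved candidate, else fuzzy scan"
theorem pvFindLoop_eq (name : String) :
    ∀ (l : List (String × List (String × String)))
      (cand : Option (String × List (String × String))),
      pvFindLoop name l cand =
        match pvFindExact name l with
        | some r => some r
        | none =>
            match cand with
            | some (code, info) => some (pvMkResult code info)
            | none => pvFindFuzzy name l := by
  intro l
  induction l with
  | nil => intro cand; cases cand <;> rfl
  | cons p rest ih =>
      intro cand
      obtain ⟨code, info⟩ := p
      by_cases hex : pvGetName info == name
      · simp [pvFindLoop, pvFindExact, hex]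
      · cases cand with
        | none =>
            simp [pvFindLoop, pvFindExact, pvFindFuzzy, hex, ih]
            split_ifs <;> cases pvFindExact name rest <;> simp
        | some q => obtain ⟨c, i⟩ := q; simp [pvFindLoop, pvFindExact, hex, ih]

-- ===== VERDICT (by name: the statement is the Claim_ definition above) =====
theorem find_meal_by_name_py_spec : Claim_equal_find_meal_by_name_py := by
  intro name meals_map _
  unfold Spec_find_meal_by_name_py find_meal_by_name_py find_meal_by_name_py_alt
  rw [pvFindLoop_eq]
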